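-- pv_equiv track=rewrite | github.com/KvanQuilst/AdventOfCode | 23/day13/day13.py | h_symmetry
-- ===== SOURCE A (Python) =====
-- def h_symmetry(pattern):
--     sum = 0
--     for i, l in enumerate(pattern[1:], 1):
--         sym = True
--         for j in range(0, i):
--             if i + j >= len(pattern) or i-j-1 < 0:
--                 break
--
--             if pattern[i+j] != pattern[i-j-1]:
--                 sym = False
--                 break
--
--         if sym:
--             sum += 100 * i
--
--     return sum
-- ===== SOURCE B (Python) =====
-- def h_symmetry(pattern):
--     n = len(pattern)
--     total = 0
--     for i in range(1, n):
--         k = min(i, n - i)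
--         if pattern[i - k:i] == pattern[i:i + k][::-1]:
--             total += 100 * i
--     return total
-- ===== Notes on version B (the rewrite author's own statement) =====
-- stated objective: simpler
-- what changed: Replaces A's inner index loop with break flags by a single comparison of the prefix slice against the reversed suffix slice (truncated to the nearer edge) for each candidate mirror line.
import Mathlib
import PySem

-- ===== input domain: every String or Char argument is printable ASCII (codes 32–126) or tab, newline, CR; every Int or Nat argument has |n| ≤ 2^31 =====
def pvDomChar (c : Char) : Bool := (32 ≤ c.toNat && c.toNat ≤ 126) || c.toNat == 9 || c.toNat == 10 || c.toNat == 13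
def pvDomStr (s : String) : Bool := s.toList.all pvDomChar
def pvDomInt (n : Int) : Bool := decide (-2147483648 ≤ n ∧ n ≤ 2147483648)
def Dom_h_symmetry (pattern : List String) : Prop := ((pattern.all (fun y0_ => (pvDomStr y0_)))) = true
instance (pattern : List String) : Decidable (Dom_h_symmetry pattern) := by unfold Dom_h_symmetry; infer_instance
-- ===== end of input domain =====

-- B replaces A's inner index loop with one reversed-slice comparison per line (same asymptotic cost; simpler).

-- ===== PORT A =====
-- inner 'for j in range(0, i)' loop with its two break conditions; fuel counts remaining j's
def aCheck (pattern : List String) (i : Nat) : Nat → Nat → Bool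
  | _, 0 => true
  | j, f+1 =>
    if pattern.length ≤ i + j ∨ (i : Int) - j - 1 < 0 then true
    else if pattern.getD (i + j) "" ≠ pattern.getD (i - (j + 1)) "" then false
    else aCheck pattern i (j + 1) f

def h_symmetry (pattern : List String) : Int :=
  (List.range' 1 (pattern.length - 1)).foldl
    (fun s i => if aCheck pattern i 0 i then s + 100 * (i : Int) else s) 0

-- ===== PORT B =====
def h_symmetry_alt (pattern : List String) : Int :=
  (List.range' 1 (pattern.length - 1)).foldl
    (fun s i =>
      let k := min i (pattern.length - i)
      if (pattern.drop (i - k)).take k = ((pattern.drop i).take k).reverse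
      then s + 100 * (i : Int) else s) 0

-- ===== PRECONDITION & SPEC =====
def Spec_h_symmetry (pattern : List String) (out : Int) : Prop := out = h_symmetry_alt pattern
instance (pattern : List String) (out : Int) : Decidable (Spec_h_symmetry pattern out) := by unfold Spec_h_symmetry; infer_instance

-- ===== CLAIM (what is proved, stated in full; the proofs are below) =====
def Claim_equal_h_symmetry : Prop := ∀ (pattern : List String), Dom_h_symmetry pattern → Spec_h_symmetry pattern (h_symmetry pattern)

-- ===== LEMMAS AND PROOFS =====

-- A's inner loop decides "all mirror pairs up to the nearer edge match"
lemma aCheck_iff (pattern : List String) (i : Nat) (hi : i < pattern.length) :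
    ∀ fuel j, j + fuel = i →
      (aCheck pattern i j fuel = true ↔
        ∀ t, j ≤ t → t < min i (pattern.length - i) →
          pattern.getD (i + t) "" = pattern.getD (i - t - 1) "") := by
  intro fuel
  induction fuel with
  | zero =>
    intro j hj
    simp only [aCheck, true_iff]
    intro t ht1 ht2
    omega
  | succ f ih =>
    intro j hj
    have hji : j < i := by omega
    simp only [aCheck]
    by_cases hb : pattern.length ≤ i + j ∨ (i : Int) - j - 1 < 0
    · simp only [if_pos hb, true_iff]
      intro t ht1 ht2
      omega
    · simp only [if_neg hb]
      by_cases hne : pattern.getD (i + j) "" ≠ pattern.getD (i - (j + 1)) ""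
      · simp only [if_pos hne]
        constructor
        · intro h; exact absurd h (by simp)
        · intro h
          exfalso
          exact hne (by
            have := h j le_rfl (by omega)
            simpa [Nat.sub_sub] using this)
      · simp only [if_neg hne]
        rw [ih (j + 1) (by omega)]
        push Not at hne
        constructor
        · intro h t ht1 ht2
          rcases Nat.eq_or_lt_of_le ht1 with rfl | hlt
          · simpa [Nat.sub_sub] using hne
          · exact h t hlt ht2
        · intro h t ht1 ht2
          exact h t (by omega) ht2

-- B's slice comparison is the same mirror condition
lemma getElem_idx_congr (pattern : List String) (a b : Nat) (ha : a < pattern.length)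
    (hb : b < pattern.length) (h : a = b) : pattern[a] = pattern[b] := by
  subst h; rfl

lemma bSlice_iff (pattern : List String) (i : Nat) (hi : i < pattern.length) :
    ((pattern.drop (i - min i (pattern.length - i))).take (min i (pattern.length - i)) =
      ((pattern.drop i).take (min i (pattern.length - i))).reverse) ↔
    ∀ t, t < min i (pattern.length - i) →
        pattern.getD (i + t) "" = pattern.getD (i - t - 1) "" := by
  set n := pattern.length with hn
  set k := min i (n - i) with hk
  have hk1 : k ≤ i := Nat.min_le_left _ _
  have hk2 : k ≤ n - i := Nat.min_le_right _ _
  constructor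
  · intro h t ht
    have ht' : k - 1 - t < k := by omega
    have := congrArg (fun l => l.getD (k - 1 - t) "") h
    simp only [List.getD_eq_getElem?_getD] at this
    rw [List.getElem?_eq_getElem (by simp [List.length_take, List.length_drop]; omega),
        List.getElem?_eq_getElem (by simp [List.length_take, List.length_drop]; omega)] at this
    simp only [Option.getD_some] at this
    rw [List.getElem_take, List.getElem_drop, List.getElem_reverse, List.getElem_take,
        List.getElem_drop] at this
    rw [List.getD_eq_getElem _ _ (show i + t < pattern.length by omega),
        List.getD_eq_getElem _ _ (show i - t - 1 < pattern.length by omega)]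
    calc pattern[i + t]'(by omega)
        = pattern[i + ((List.take k (List.drop i pattern)).length - 1 - (k - 1 - t))]'(by
            simp [List.length_take, List.length_drop]; omega) :=
          getElem_idx_congr _ _ _ _ _ (by simp [List.length_take, List.length_drop]; omega)
      _ = pattern[i - k + (k - 1 - t)]'(by omega) := this.symm
      _ = pattern[i - t - 1]'(by omega) := getElem_idx_congr _ _ _ _ _ (by omega)
  · intro h
    apply List.ext_getElem (by simp [List.length_take, List.length_drop]; omega)
    intro t h1 h2
    rw [List.getElem_take, List.getElem_drop, List.getElem_reverse, List.getElem_take,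
        List.getElem_drop]
    have ht : t < k := by simp [List.length_take, List.length_drop] at h1; omega
    have h3 := h (k - 1 - t) (by omega)
    rw [List.getD_eq_getElem _ _ (show i + (k - 1 - t) < pattern.length by omega),
        List.getD_eq_getElem _ _ (show i - (k - 1 - t) - 1 < pattern.length by omega)] at h3
    calc pattern[i - k + t]'(by omega)
        = pattern[i - (k - 1 - t) - 1]'(by omega) := getElem_idx_congr _ _ _ _ _ (by omega)
      _ = pattern[i + (k - 1 - t)]'(by omega) := h3.symm
      _ = pattern[i + ((List.take k (List.drop i pattern)).length - 1 - t)]'(by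
            simp [List.length_take, List.length_drop]; omega) :=
          getElem_idx_congr _ _ _ _ _ (by simp [List.length_take, List.length_drop]; omega)

theorem h_symmetry_spec : Claim_equal_h_symmetry := by
  intro pattern _
  unfold Spec_h_symmetry h_symmetry h_symmetry_alt
  apply PySem.List.foldl_congr_mem
  intro s i hmem
  have hmem' := List.mem_range'_1.mp hmem
  have hi1 : 1 ≤ i := hmem'.1
  have hi : i < pattern.length := by omega
  have hA := aCheck_iff pattern i hi i 0 (by omega)
  have hB := bSlice_iff pattern i hi
  by_cases hcond : ∀ t, t < min i (pattern.length - i) →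
      pattern.getD (i + t) "" = pattern.getD (i - t - 1) ""
  · have hA' : aCheck pattern i 0 i = true := hA.mpr (fun t _ ht => hcond t ht)
    rw [hA', if_pos (hB.mpr hcond)]
    simp
  · have hA' : aCheck pattern i 0 i = false := by
      rcases Bool.eq_false_or_eq_true (aCheck pattern i 0 i) with htr | hf
      · exact absurd (fun t ht => (hA.mp htr) t (Nat.zero_le t) ht) hcond
      · exact hf
    rw [hA', if_neg (fun h => hcond (hB.mp h))]
    simp
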